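-- pv_equiv track=rewrite | github.com/Aasthaengg/IBMdataset | Python_codes/p03147/s016641412.py | cz
-- ===== SOURCE A (Python) =====
-- def cz(A):
--     N = len(A)
--     F = [0]
--     for i in range(N):
--         if A[i] == 0:
--             F.append(0)
--         else:
--             F.append(1)
--
--     res = 0
--     for i in range(N):
--         if F[i] == 0 and F[i+1] == 1:
--             res += 1
--
--     return(res)
-- ===== SOURCE B (Python) =====
-- def cz(A):
--     prev_zero = True
--     res = 0
--     for a in A:
--         if prev_zero and a != 0:
--             res += 1
--         prev_zero = (a == 0)
--     return res
-- ===== Notes on version B (the rewrite author's own statement) =====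
-- stated objective: simpler
-- what changed: Replaces the build-a-flag-table-then-index-scan two-pass with a single pass over A that tracks one prev_zero boolean (initially True, modeling the prepended sentinel) and counts zero-to-nonzero transitions; no intermediate list is allocated.
import Mathlib
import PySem

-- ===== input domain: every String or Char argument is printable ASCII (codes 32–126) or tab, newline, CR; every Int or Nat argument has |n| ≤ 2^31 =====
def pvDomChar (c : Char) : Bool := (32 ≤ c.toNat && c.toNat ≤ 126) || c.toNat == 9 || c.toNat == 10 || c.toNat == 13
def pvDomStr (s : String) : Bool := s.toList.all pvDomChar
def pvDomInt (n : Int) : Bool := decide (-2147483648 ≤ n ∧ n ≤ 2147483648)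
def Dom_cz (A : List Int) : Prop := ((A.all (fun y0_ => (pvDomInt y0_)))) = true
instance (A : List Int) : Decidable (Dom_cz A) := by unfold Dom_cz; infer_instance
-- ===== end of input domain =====

-- B replaces A's two passes (build flag table F, then scan index pairs) with one pass
-- keeping a prev_zero boolean; return values agree everywhere (no mutation involved).
-- ===== PORT A =====
def cz (A : List Int) : Int :=
  let N : Int := (A.length : Int)
  let F : List Int :=
    (PySem.List.pyRange 0 N 1).foldl
      (fun F i => if PySem.List.pyGetD A i 0 = 0 then F ++ [(0 : Int)] else F ++ [(1 : Int)]) [0]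
  (PySem.List.pyRange 0 N 1).foldl
    (fun res i =>
      if PySem.List.pyGetD F i 0 = 0 ∧ PySem.List.pyGetD F (i + 1) 0 = 1 then res + 1 else res) 0

-- ===== PORT B =====
def cz_alt (A : List Int) : Int :=
  (A.foldl (fun (s : Bool × Int) a =>
      (decide (a = 0), if s.1 = true ∧ a ≠ 0 then s.2 + 1 else s.2)) (true, 0)).2

-- ===== PRECONDITION & SPEC =====
def Spec_cz (A : List Int) (out : Int) : Prop := out = cz_alt A
instance (A : List Int) (out : Int) : Decidable (Spec_cz A out) := by unfold Spec_cz; infer_instance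

-- ===== CLAIM (what is proved, stated in full; the proofs are below) =====
def Claim_equal_cz : Prop := ∀ (A : List Int), Dom_cz A → Spec_cz A (cz A)

-- ===== LEMMAS AND PROOFS =====

-- the flag value A appends for an element
def czFlag (a : Int) : Int := if a = 0 then 0 else 1

-- adjacent-pair edge count of x :: G (proof-side characterisation of A's second loop)
def czPairs (x : Int) : List Int → Int
  | [] => 0
  | g :: G => (if x = 0 ∧ g = 1 then 1 else 0) + czPairs g G

theorem czPairs_nil (x : Int) : czPairs x [] = 0 := rfl

theorem czPairs_cons (x g : Int) (G : List Int) :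
    czPairs x (g :: G) = (if x = 0 ∧ g = 1 then 1 else 0) + czPairs g G := rfl

theorem czF_eq (A : List Int) :
    (PySem.List.pyRange 0 (A.length : Int) 1).foldl
      (fun F i => if PySem.List.pyGetD A i 0 = 0 then F ++ [(0 : Int)] else F ++ [(1 : Int)]) [0]
    = 0 :: A.map czFlag := by
  rw [PySem.List.foldl_pyRange_zero_pyGetD' A 0
      (fun F a => if a = 0 then F ++ [(0 : Int)] else F ++ [(1 : Int)]) [0]]
  have h : (fun (F : List Int) (a : Int) =>
      if a = 0 then F ++ [(0 : Int)] else F ++ [(1 : Int)])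
      = fun F a => F ++ [czFlag a] := by
    funext F a; unfold czFlag; split <;> rfl
  rw [h, PySem.List.foldl_append_singleton_eq_map]
  rfl

theorem cz_getD_cons (x : Int) (L : List Int) (i : Int) (h : 0 ≤ i) :
    PySem.List.pyGetD (x :: L) (i + 1) 0 = PySem.List.pyGetD L i 0 := by
  have h1 : (i + 1).toNat = i.toNat + 1 := by omega
  have h2 : 0 ≤ i + 1 := by omega
  simp [PySem.List.pyGetD, PySem.List.pyGet?, PySem.List.pyIdx?, h1, h, h2]
  split <;> simp

theorem cz_scanR (G : List Int) : ∀ (x r : Int),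
    (List.range G.length).foldl
      (fun res (k : Nat) =>
        if PySem.List.pyGetD (x :: G) (k : Int) 0 = 0 ∧
           PySem.List.pyGetD (x :: G) ((k : Int) + 1) 0 = 1
        then res + 1 else res) r
    = r + czPairs x G := by
  induction G with
  | nil => intro x r; simp [czPairs_nil]
  | cons g G ih =>
    intro x r
    rw [List.length_cons, List.range_succ_eq_map, List.foldl_cons, List.foldl_map]
    simp only [Nat.succ_eq_add_one]
    have h : ∀ (res : Int) (k : Nat), k ∈ List.range G.length →
        (if PySem.List.pyGetD (x :: g :: G) ((k + 1 : Nat) : Int) 0 = 0 ∧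
            PySem.List.pyGetD (x :: g :: G) (((k + 1 : Nat) : Int) + 1) 0 = 1
         then res + 1 else res)
        = (if PySem.List.pyGetD (g :: G) (k : Int) 0 = 0 ∧
              PySem.List.pyGetD (g :: G) ((k : Int) + 1) 0 = 1
           then res + 1 else res) := by
      intro res k _
      have h1 : ((k + 1 : Nat) : Int) = (k : Int) + 1 := by push_cast; ring
      rw [h1, cz_getD_cons _ _ _ (by positivity), cz_getD_cons _ _ _ (by positivity)]
    rw [List.foldl_ext _ _ _ h, ih]
    have hx : PySem.List.pyGetD (x :: g :: G) ((0 : Nat) : Int) 0 = x := by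
      have hp : (0:Int) ≤ (G.length:Int) + 1 := by positivity
      simp [PySem.List.pyGetD, PySem.List.pyGet?, PySem.List.pyIdx?, hp]
    have hg : PySem.List.pyGetD (x :: g :: G) (((0 : Nat) : Int) + 1) 0 = g := by
      simp [PySem.List.pyGetD, PySem.List.pyGet?, PySem.List.pyIdx?]
    rw [hx, hg, czPairs_cons]
    split <;> ring

theorem cz_scan_eq (G : List Int) (x r : Int) :
    (PySem.List.pyRange 0 (G.length : Int) 1).foldl
      (fun res i =>
        if PySem.List.pyGetD (x :: G) i 0 = 0 ∧ PySem.List.pyGetD (x :: G) (i + 1) 0 = 1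
        then res + 1 else res) r
    = r + czPairs x G := by
  rw [PySem.List.pyRange_zero_natCast, List.foldl_map, cz_scanR]

theorem cz_alt_eq (A : List Int) : ∀ (b : Bool) (r : Int),
    (A.foldl (fun (s : Bool × Int) a =>
        (decide (a = 0), if s.1 = true ∧ a ≠ 0 then s.2 + 1 else s.2)) (b, r)).2
    = r + czPairs (if b then 0 else 1) (A.map czFlag) := by
  induction A with
  | nil => intro b r; cases b <;> simp [czPairs_nil]
  | cons a A ih =>
    intro b r
    rw [List.foldl_cons, ih, List.map_cons]
    have hflag : (if decide (a = 0) = true then (0 : Int) else 1) = czFlag a := by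
      unfold czFlag; by_cases h : a = 0 <;> simp [h]
    rw [hflag, czPairs_cons]
    cases b <;> by_cases h : a = 0 <;> simp [czFlag, h] <;> ring

-- ===== VERDICT (by name: the statement is the Claim_ definition above) =====
theorem cz_spec : Claim_equal_cz := by
  intro A _
  unfold Spec_cz cz cz_alt
  simp only []
  rw [czF_eq]
  rw [show ((A.length : Int)) = (((A.map czFlag).length : Int)) from by simp]
  rw [cz_scan_eq, cz_alt_eq]
  simp
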